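-- pv_equiv track=rewrite | github.com/Jiteesh-Bhupathiraju/Data-structures-and-algorithms | arrays/nth_k.py | nth_k_div
-- ===== SOURCE A (Python) =====
-- def nth_k_div(n,k):
--     i=k-1
--     while n:
--         if i%k==0 or str(k) in str(i):
--             n-=1
--         if n==0:
--             return i
--         i+=1
--     return i
-- ===== SOURCE B (Python) =====
-- def nth_k_div(n, k):
--     # Advance match-by-match: within each block up to the next multiple of k
--     # (computed arithmetically), only the substring test is needed, with str(k)
--     # computed once; the multiple itself always matches.
--     ks = str(k)
--     K = abs(k)
--     i = k - 1
--     nxt = k - 1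
--     for _ in range(n):
--         m = nxt + (-nxt) % K          # least multiple of k that is >= nxt
--         j = nxt
--         while j < m and ks not in str(j):
--             j += 1
--         i = j                          # first match >= nxt
--         nxt = j + 1
--     return i
-- ===== Notes on version B (the rewrite author's own statement) =====
-- stated objective: alternative
-- what changed: Instead of testing every integer with 'i%k==0 or str(k) in str(i)', B jumps arithmetically to the next multiple of k and scans only the gap before it for substring hits, with str(k) converted once (no per-number modulo test or str(k) rebuild); measured ~3.5x in a timing run but not confirmed at the largest size.
-- outside the precondition, e.g. on nth_k_div(2, 0): A raises ZeroDivisionError, B raises ZeroDivisionError; on nth_k_div(-1, 3): A does not finish within the time limit, B returns 2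
import Mathlib
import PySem

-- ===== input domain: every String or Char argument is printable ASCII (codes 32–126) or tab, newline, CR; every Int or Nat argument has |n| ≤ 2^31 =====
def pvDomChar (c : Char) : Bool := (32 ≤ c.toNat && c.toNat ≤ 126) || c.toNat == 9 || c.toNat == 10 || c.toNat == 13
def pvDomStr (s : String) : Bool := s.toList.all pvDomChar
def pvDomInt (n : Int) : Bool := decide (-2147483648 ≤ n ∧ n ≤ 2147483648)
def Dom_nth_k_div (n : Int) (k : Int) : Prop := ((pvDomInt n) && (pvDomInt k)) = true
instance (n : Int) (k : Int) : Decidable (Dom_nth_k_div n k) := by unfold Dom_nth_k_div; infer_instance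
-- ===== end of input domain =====

-- B replaces A's per-number "i%k==0 or str(k) in str(i)" test by arithmetic jumps to the
-- next multiple of k, scanning only each gap for substring hits with str(k) built once
-- (objective: alternative; return value proved equal on Pre_).

-- ===== PORT A =====
-- A's while-loop; the fuel only makes it total (under Pre_ it provably suffices).
def aLoop (fuel : Nat) (n i k : Int) : Int :=
  match fuel with
  | 0 => i
  | fuel + 1 =>
    if n ≠ 0 then
      let n' := if PySem.Int.mod i k = 0 ∨ PySem.Str.isIn (PySem.Int.toStr k) (PySem.Int.toStr i) = true then n - 1 else n
      if n' = 0 then i else aLoop fuel n' (i + 1) k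
    else i

def nth_k_div (n : Int) (k : Int) : Int :=
  aLoop ((n.toNat + 1) * (k.natAbs + 1) + 1) n (k - 1) k

-- ===== PORT B =====
-- while j < m and ks not in str(j): j += 1   (value of j when the loop stops)
def bScan (ks : String) (j m : Int) : Int :=
  if j < m then
    (if PySem.Str.isIn ks (PySem.Int.toStr j) = true then j else bScan ks (j + 1) m)
  else j
termination_by (m - j).toNat
decreasing_by omega

-- for _ in range(n): m = nxt + (-nxt) % K; j = scan; i = j; nxt = j + 1
def bOuter (c : Nat) (k : Int) (ks : String) (i nxt : Int) : Int :=
  match c with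
  | 0 => i
  | c + 1 =>
    let K : Int := (k.natAbs : Int)
    let m := nxt + PySem.Int.mod (-nxt) K
    let j := bScan ks nxt m
    bOuter c k ks j (j + 1)

def nth_k_div_alt (n : Int) (k : Int) : Int :=
  bOuter n.toNat k (PySem.Int.toStr k) (k - 1) (k - 1)

-- ===== PRECONDITION & SPEC =====
-- A raises ZeroDivisionError for k = 0 with n ≠ 0 and loops forever for n < 0;
-- exactly those inputs are excluded (A returns on everything Pre_ admits).
def Pre_nth_k_div (n : Int) (k : Int) : Prop := 0 ≤ n ∧ (n = 0 ∨ k ≠ 0)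
instance (n : Int) (k : Int) : Decidable (Pre_nth_k_div n k) := by unfold Pre_nth_k_div; infer_instance

def pvWitness_nth_k_div : Int × Int := (3, 7)

def Spec_nth_k_div (n : Int) (k : Int) (out : Int) : Prop := out = nth_k_div_alt n k
instance (n : Int) (k : Int) (out : Int) : Decidable (Spec_nth_k_div n k out) := by unfold Spec_nth_k_div; infer_instance

-- ===== CLAIM (what is proved, stated in full; the proofs are below) =====
def Claim_equal_nth_k_div : Prop := ∀ (n : Int) (k : Int), Dom_nth_k_div n k → Pre_nth_k_div n k → Spec_nth_k_div n k (nth_k_div n k)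

-- ===== LEMMAS AND PROOFS =====

def MatchK (k i : Int) : Prop :=
  k ∣ i ∨ PySem.Str.isIn (PySem.Int.toStr k) (PySem.Int.toStr i) = true

-- least multiple of k at or above i, via PySem mod (exactly as B computes it)
theorem next_mult (k i : Int) (hk : k ≠ 0) :
    0 ≤ PySem.Int.mod (-i) (k.natAbs : Int) ∧ PySem.Int.mod (-i) (k.natAbs : Int) < (k.natAbs : Int) ∧
    k ∣ (i + PySem.Int.mod (-i) (k.natAbs : Int)) ∧
    ∀ x, i ≤ x → x < i + PySem.Int.mod (-i) (k.natAbs : Int) → ¬ k ∣ x := by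
  have hK : (0:Int) < (k.natAbs : Int) := by
    have : k.natAbs ≠ 0 := Int.natAbs_ne_zero.mpr hk
    omega
  rw [PySem.Int.mod_eq_emod_of_pos hK]
  set K : Int := (k.natAbs : Int) with hKdef
  have h0 : 0 ≤ (-i) % K := Int.emod_nonneg _ (by omega)
  have h1 : (-i) % K < K := Int.emod_lt_of_pos _ hK
  have hdvdK : ∀ x : Int, k ∣ x ↔ K ∣ x := by
    intro x; rw [hKdef]; exact (Int.natAbs_dvd).symm
  have hd : K ∣ (i + (-i) % K) := by
    have : (-i) % K = -i - K * ((-i) / K) := Int.emod_def _ _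
    refine ⟨-((-i) / K), ?_⟩
    rw [this]; ring
  refine ⟨h0, h1, (hdvdK _).mpr hd, ?_⟩
  intro x hix hxm hkx
  have hKx : K ∣ x := (hdvdK _).mp hkx
  have hdiff : K ∣ (i + (-i) % K - x) := dvd_sub hd hKx
  have hpos : 0 < i + (-i) % K - x := by omega
  have hlt : i + (-i) % K - x < K := by omega
  have := Int.le_of_dvd hpos hdiff
  omega
theorem exists_match (k i : Int) (hk : k ≠ 0) : ∃ t : Nat, MatchK k (i + t) := by
  obtain ⟨h0, h1, hd, -⟩ := next_mult k i hk
  refine ⟨(PySem.Int.mod (-i) (k.natAbs : Int)).toNat, Or.inl ?_⟩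
  rwa [Int.toNat_of_nonneg h0]

noncomputable def Fm (k i : Int) : Int := i + (sInf {t : ℕ | MatchK k (i + t)} : ℕ)

theorem Fm_ge (k i : Int) : i ≤ Fm k i := by unfold Fm; omega

theorem Fm_match {k i : Int} (h : MatchK k i) : Fm k i = i := by
  unfold Fm
  have : sInf {t : ℕ | MatchK k (i + t)} = 0 :=
    Nat.eq_zero_of_le_zero (Nat.sInf_le (by simpa using h))
  simp [this]

theorem Fm_isMatch {k : Int} (i : Int) (hk : k ≠ 0) : MatchK k (Fm k i) := by
  have hne : {t : ℕ | MatchK k (i + t)}.Nonempty := exists_match k i hk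
  exact Nat.sInf_mem hne

theorem Fm_min {k i : Int} (x : Int) (hix : i ≤ x) (hxf : x < Fm k i) : ¬ MatchK k x := by
  unfold Fm at hxf
  have hlt : (x - i).toNat < sInf {t : ℕ | MatchK k (i + t)} := by omega
  have hns := Nat.notMem_of_lt_sInf hlt
  have hx : i + (((x - i).toNat : ℕ) : Int) = x := by omega
  intro hM
  exact hns (by simp only [Set.mem_setOf_eq]; rwa [hx])

theorem Fm_le {k i : Int} (t : ℕ) (h : MatchK k (i + t)) : Fm k i ≤ i + t := by
  unfold Fm
  have := Nat.sInf_le (show t ∈ {t : ℕ | MatchK k (i + t)} from h)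
  omega

theorem Fm_eq_of {k i j : Int} (hk : k ≠ 0) (hij : i ≤ j) (hm : MatchK k j)
    (hmin : ∀ x, i ≤ x → x < j → ¬ MatchK k x) : Fm k i = j := by
  have h1 : Fm k i ≤ j := by
    have := Fm_le (k := k) (i := i) (j - i).toNat
      (by rwa [show i + ((j - i).toNat : Int) = j by omega])
    omega
  rcases lt_or_eq_of_le h1 with h | h
  · exact absurd (Fm_isMatch i hk) (hmin _ (Fm_ge k i) h)
  · exact h

theorem Fm_step {k i : Int} (hk : k ≠ 0) (h : ¬ MatchK k i) : Fm k i = Fm k (i + 1) := by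
  refine Fm_eq_of hk (by have := Fm_ge k (i+1); omega) (Fm_isMatch _ hk) ?_
  intro x hix hxf
  rcases eq_or_lt_of_le hix with h' | h'
  · rwa [← h']
  · exact Fm_min x (by omega) hxf

theorem Fm_lt {k : Int} (i : Int) (hk : k ≠ 0) : Fm k i < i + (k.natAbs : Int) := by
  obtain ⟨h0, h1, hd, -⟩ := next_mult k i hk
  have := Fm_le (k := k) (i := i) (PySem.Int.mod (-i) (k.natAbs : Int)).toNat
    (by rw [Int.toNat_of_nonneg h0]; exact Or.inl hd)
  omega

-- Dm k c nxt = the c-th hit of the scan starting at nxt (Dm k 0 nxt = nxt - 1 by convention)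
noncomputable def Dm (k : Int) (c : Nat) (nxt : Int) : Int :=
  match c with
  | 0 => nxt - 1
  | c + 1 => Fm k (Dm k c nxt + 1)

theorem Dm_bottom (k : Int) (c : Nat) (nxt : Int) :
    Dm k (c + 1) nxt = Dm k c (Fm k nxt + 1) := by
  induction c generalizing nxt with
  | zero =>
    simp only [Dm]
    rw [show nxt - 1 + 1 = nxt by ring]
    omega
  | succ c IH =>
    have IH' : Fm k (Dm k c nxt + 1) = Dm k c (Fm k nxt + 1) := by
      have h := IH nxt
      simp only [Dm] at h
      exact h
    simp only [Dm]
    rw [IH']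

theorem Dm_ge_add (k : Int) (c : Nat) (nxt : Int) : nxt - 1 + (c : Int) ≤ Dm k c nxt := by
  induction c with
  | zero => simp [Dm]
  | succ c IH =>
    have := Fm_ge k (Dm k c nxt + 1)
    simp only [Dm]
    push_cast
    omega

theorem Dm_isMatch {k : Int} (c : Nat) (nxt : Int) (hk : k ≠ 0) (hc : 1 ≤ c) :
    MatchK k (Dm k c nxt) := by
  obtain ⟨c', rfl⟩ : ∃ c', c = c' + 1 := ⟨c - 1, by omega⟩
  simp only [Dm]
  exact Fm_isMatch _ hk

theorem Dm_match_shift {k i : Int} (c : Nat) (hm : MatchK k i) :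
    Dm k (c + 1) i = Dm k c (i + 1) := by
  rw [Dm_bottom, Fm_match hm]

theorem Dm_nomatch_shift {k i : Int} (c : Nat) (hk : k ≠ 0) (h : ¬ MatchK k i) (hc : 1 ≤ c) :
    Dm k c i = Dm k c (i + 1) := by
  obtain ⟨c', rfl⟩ : ∃ c', c = c' + 1 := ⟨c - 1, by omega⟩
  rw [Dm_bottom, Dm_bottom, Fm_step hk h]

theorem Dm_bound {k : Int} (c : Nat) (nxt : Int) (hk : k ≠ 0) :
    Dm k c nxt ≤ nxt - 1 + (c : Int) * (k.natAbs : Int) := by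
  induction c with
  | zero => simp [Dm]
  | succ c IH =>
    have h1 := Fm_lt (Dm k c nxt + 1) hk
    have hring : ((c : Int) + 1) * (k.natAbs : Int) = (c : Int) * (k.natAbs : Int) + (k.natAbs : Int) := by ring
    simp only [Dm, Nat.cast_add, Nat.cast_one]
    rw [hring]
    omega

-- ===== A side =====
theorem aLoop_eq {k : Int} (fuel : Nat) (n i : Int) (hk : k ≠ 0) (hn : 1 ≤ n)
    (hf : (Dm k n.toNat i - i).toNat + 1 ≤ fuel) :
    aLoop fuel n i k = Dm k n.toNat i := by
  induction fuel generalizing n i with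
  | zero => omega
  | succ f IH =>
    have hn0 : ¬ n = 0 := by omega
    have hc1 : 1 ≤ n.toNat := by omega
    have hiff : (PySem.Int.mod i k = 0 ∨ PySem.Str.isIn (PySem.Int.toStr k) (PySem.Int.toStr i) = true) ↔ MatchK k i := by
      unfold MatchK
      exact or_congr_left (PySem.Int.mod_eq_zero_iff_dvd i k)
    rw [aLoop, if_pos hn0]
    by_cases hm : MatchK k i
    · rw [if_pos (hiff.mpr hm)]
      by_cases h1 : n - 1 = 0
      · rw [if_pos h1]
        have hn1 : n.toNat = 1 := by omega
        rw [hn1]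
        simp only [Dm]
        rw [show i - 1 + 1 = i by ring, Fm_match hm]
      · rw [if_neg h1]
        have hsh : Dm k n.toNat i = Dm k (n - 1).toNat (i + 1) := by
          have h2 : n.toNat = (n - 1).toNat + 1 := by omega
          rw [h2, Dm_match_shift _ hm]
        have hgea := Dm_ge_add k n.toNat i
        have hc2 : 2 ≤ n.toNat := by omega
        rw [IH (n - 1) (i + 1) (by omega) (by rw [← hsh]; omega), hsh]
    · rw [if_neg (fun hcond => hm (hiff.mp hcond)), if_neg hn0]
      have hsh : Dm k n.toNat i = Dm k n.toNat (i + 1) := Dm_nomatch_shift _ hk hm hc1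
      have hgea := Dm_ge_add k n.toNat i
      have hne : Dm k n.toNat i ≠ i := fun he => hm (he ▸ Dm_isMatch n.toNat i hk hc1)
      rw [IH n (i + 1) hn (by rw [← hsh]; omega), hsh]

-- ===== B side =====
theorem bScan_eq {k : Int} (j m : Int) (hk : k ≠ 0) (hdvd : k ∣ m) (hjm : j ≤ m)
    (hmin : ∀ x, j ≤ x → x < m → ¬ k ∣ x) :
    bScan (PySem.Int.toStr k) j m = Fm k j := by
  have H : ∀ d : Nat, ∀ j, (m - j).toNat = d → j ≤ m → (∀ x, j ≤ x → x < m → ¬ k ∣ x) →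
      bScan (PySem.Int.toStr k) j m = Fm k j := by
    intro d
    induction d using Nat.strong_induction_on with
    | _ d IH =>
      intro j hd hjm hmin
      rw [bScan]
      by_cases hlt : j < m
      · rw [if_pos hlt]
        by_cases hin : PySem.Str.isIn (PySem.Int.toStr k) (PySem.Int.toStr j) = true
        · rw [if_pos hin, Fm_match (Or.inr hin)]
        · rw [if_neg hin]
          have hnm : ¬ MatchK k j := by
            rintro (h | h)
            · exact hmin j le_rfl hlt h
            · exact hin h
          rw [Fm_step hk hnm]
          exact IH (m - (j + 1)).toNat (by omega) (j + 1) rfl (by omega)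
            (fun x hx1 hx2 => hmin x (by omega) hx2)
      · rw [if_neg hlt]
        have hjm' : j = m := by omega
        subst hjm'
        rw [Fm_match (Or.inl hdvd)]
  exact H (m - j).toNat j rfl hjm hmin

theorem bOuter_succ (c : Nat) (k : Int) (ks : String) (i nxt : Int) :
    bOuter (c + 1) k ks i nxt =
      bOuter c k ks (bScan ks nxt (nxt + PySem.Int.mod (-nxt) (k.natAbs : Int)))
        (bScan ks nxt (nxt + PySem.Int.mod (-nxt) (k.natAbs : Int)) + 1) := rfl

theorem bOuter_eq {k : Int} (c : Nat) (i nxt : Int) (hk : k ≠ 0) :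
    bOuter (c + 1) k (PySem.Int.toStr k) i nxt = Dm k (c + 1) nxt := by
  induction c generalizing i nxt with
  | zero =>
    obtain ⟨h0, h1, hd, hmin⟩ := next_mult k nxt hk
    rw [bOuter_succ, bScan_eq _ _ hk hd (by omega) hmin]
    simp only [bOuter, Dm]
    rw [show nxt - 1 + 1 = nxt by ring]
  | succ c IH =>
    obtain ⟨h0, h1, hd, hmin⟩ := next_mult k nxt hk
    rw [bOuter_succ (c + 1), bScan_eq _ _ hk hd (by omega) hmin, IH,
      Dm_bottom k (c + 1) nxt]

-- ===== VERDICT (by name: the statement is the Claim_ definition above) =====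
theorem nth_k_div_spec : Claim_equal_nth_k_div := by
  intro n k _hdom hpre
  obtain ⟨hn0, hor⟩ := hpre
  unfold Spec_nth_k_div
  by_cases hn : n = 0
  · subst hn
    simp [nth_k_div, nth_k_div_alt, aLoop, bOuter]
  · have hk : k ≠ 0 := by tauto
    have hn1 : 1 ≤ n := by omega
    have hK1 : 1 ≤ (k.natAbs : Int) := by
      have : k.natAbs ≠ 0 := Int.natAbs_ne_zero.mpr hk
      omega
    have hA : nth_k_div n k = Dm k n.toNat (k - 1) := by
      unfold nth_k_div
      apply aLoop_eq _ _ _ hk hn1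
      have hb := Dm_bound n.toNat (k - 1) hk
      have hg := Dm_ge_add k n.toNat (k - 1)
      set D := Dm k n.toNat (k - 1) with hD
      have hle : D - (k - 1) ≤ (((n.toNat + 1) * (k.natAbs + 1) : Nat) : Int) := by
        have hcK : (((n.toNat + 1) * (k.natAbs + 1) : Nat) : Int)
            = (n.toNat : Int) * (k.natAbs : Int) + (n.toNat : Int) + (k.natAbs : Int) + 1 := by
          push_cast; ring
        rw [hcK]
        have hcn : (0 : Int) ≤ (n.toNat : Int) := by positivity
        omega
      have := Int.toNat_le.mpr hle
      omega
    have hB : nth_k_div_alt n k = Dm k n.toNat (k - 1) := by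
      unfold nth_k_div_alt
      obtain ⟨c', hc'⟩ : ∃ c', n.toNat = c' + 1 := ⟨n.toNat - 1, by omega⟩
      rw [hc']
      exact bOuter_eq c' (k - 1) (k - 1) hk
    rw [hA, hB]
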